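-- pv_equiv track=rewrite | github.com/jacobmchen/supervised_missing | method_comparison/paired_ttest.py | xaxis_label_format
-- ===== SOURCE A (Python) =====
-- def xaxis_label_format(labels):
--     formatted = []
--
--     # add a line break for every other label so that the x axis labels
--     # don't overlap with each other on the table
--     for i in range(len(labels)):
--         if i % 2 == 1:
--             formatted.append('\n' + labels[i])
--         else:
--             formatted.append(labels[i])
--     return formatted
-- ===== SOURCE B (Python) =====
-- def xaxis_label_format(labels):
--     formatted = list(labels)
--     formatted[1::2] = ['\n' + x for x in formatted[1::2]]
--     return formatted
-- ===== Notes on version B (the rewrite author's own statement) =====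
-- stated objective: idiomatic
-- what changed: Replaces the index-and-branch append loop with a copy-then-patch: shallow-copy the labels and rewrite only the odd positions via an extended-slice assignment.
import Mathlib
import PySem

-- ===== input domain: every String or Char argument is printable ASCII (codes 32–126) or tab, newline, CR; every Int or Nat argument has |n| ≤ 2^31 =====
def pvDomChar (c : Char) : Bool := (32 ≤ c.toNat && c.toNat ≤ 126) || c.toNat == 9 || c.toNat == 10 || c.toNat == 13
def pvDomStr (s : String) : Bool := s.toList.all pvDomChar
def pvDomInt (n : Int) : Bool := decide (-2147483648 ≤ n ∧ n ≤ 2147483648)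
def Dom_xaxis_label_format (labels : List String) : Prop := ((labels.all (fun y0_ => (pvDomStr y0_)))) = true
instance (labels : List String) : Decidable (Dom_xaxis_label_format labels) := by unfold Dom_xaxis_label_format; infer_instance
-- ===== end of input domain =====

-- B replaces A's index-and-branch append loop with a copy-then-patch over the odd-index slice (idiomatic, same cost).


-- ===== PORT A =====
-- for i in range(len(labels)): if i % 2 == 1: append('\n'+labels[i]) else append(labels[i])
def xaxis_label_format (labels : List String) : List String :=
  (PySem.List.pyRange 0 (PySem.List.len labels) 1).foldl
    (fun formatted i =>
      if PySem.Int.mod i 2 == 1 then formatted ++ ["\n" ++ PySem.List.pyGetD labels i ""]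
      else formatted ++ [PySem.List.pyGetD labels i ""]) []

-- ===== PORT B =====
-- formatted[1::2] — the elements at odd indices
def oddSlice : List String → List String
  | [] => []
  | [_] => []
  | _ :: y :: rest => y :: oddSlice rest

-- extended-slice assignment formatted[1::2] = vs (vs has exactly the slice's length)
def assignOdd : List String → List String → List String
  | xs, [] => xs
  | [], _ => []
  | [x], _ => [x]
  | x :: _ :: rest, v :: vs => x :: v :: assignOdd rest vs

def xaxis_label_format_alt (labels : List String) : List String :=
  assignOdd labels ((oddSlice labels).map (fun x => "\n" ++ x))

-- ===== PRECONDITION & SPEC =====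
def Spec_xaxis_label_format (labels : List String) (out : List String) : Prop := out = xaxis_label_format_alt labels
instance (labels : List String) (out : List String) : Decidable (Spec_xaxis_label_format labels out) := by unfold Spec_xaxis_label_format; infer_instance

-- ===== CLAIM (what is proved, stated in full; the proofs are below) =====
def Claim_equal_xaxis_label_format : Prop := ∀ (labels : List String), Dom_xaxis_label_format labels → Spec_xaxis_label_format labels (xaxis_label_format labels)

-- ===== LEMMAS AND PROOFS =====

-- the value A appends at index k (proof-only helper)
def fA (xs : List String) (k : Nat) : String :=
  if (k : Int) % 2 == 1 then "\n" ++ xs.getD k "" else xs.getD k ""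

theorem A_eq_map (labels : List String) :
    xaxis_label_format labels = (List.range labels.length).map (fA labels) := by
  unfold xaxis_label_format
  have h : (fun (formatted : List String) (i : Int) =>
      if PySem.Int.mod i 2 == 1 then formatted ++ ["\n" ++ PySem.List.pyGetD labels i ""]
      else formatted ++ [PySem.List.pyGetD labels i ""]) =
      (fun formatted i => formatted ++ [(fun i =>
        if PySem.Int.mod i 2 == 1 then "\n" ++ PySem.List.pyGetD labels i ""
        else PySem.List.pyGetD labels i "") i]) := by
    funext formatted i
    exact (apply_ite (fun s => formatted ++ [s]) _ _ _).symm
  rw [h, PySem.List.foldl_append_singleton_eq_map, PySem.List.pyRange_one]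
  simp [List.map_map, Function.comp, PySem.Int.mod, Int.fmod_eq_emod, fA]

theorem alt_cons (x y : String) (r : List String) :
    xaxis_label_format_alt (x :: y :: r) = x :: ("\n" ++ y) :: xaxis_label_format_alt r := rfl

theorem fA_shift (x y : String) (r : List String) (k : Nat) :
    fA (x :: y :: r) (k + 2) = fA r k := by
  simp [fA]

theorem map_eq_alt : ∀ (labels : List String),
    (List.range labels.length).map (fA labels) = xaxis_label_format_alt labels
  | [] => rfl
  | [x] => rfl
  | x :: y :: rest => by
    have ih := map_eq_alt rest
    show (List.range (rest.length + 1 + 1)).map (fA (x :: y :: rest)) = _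
    rw [List.range_succ_eq_map, List.range_succ_eq_map]
    simp only [List.map_cons, List.map_map]
    have hcomp : (fA (x :: y :: rest)) ∘ (fun k => Nat.succ (Nat.succ k)) = fA rest := by
      funext k; exact fA_shift x y rest k
    rw [alt_cons, ← ih]
    congr 1
    congr 1
    exact congrArg (List.map · (List.range rest.length)) hcomp

-- ===== VERDICT (by name: the statement is the Claim_ definition above) =====
theorem xaxis_label_format_spec : Claim_equal_xaxis_label_format := by
  intro labels _
  unfold Spec_xaxis_label_format
  rw [A_eq_map, map_eq_alt]
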